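-- pv_equiv track=rewrite | github.com/MohamedBoudabbous16/ITI1520 | Devoirs/d4_300376202/d4.py | matrixMinMax
-- ===== SOURCE A (Python) =====
-- def matrixMinMax(m):     #list ----> tuple
--     #prends comme entrée une liste de listes de nombres m et retourne un tuple contenant les valeurs minimale et maximale de m.
--     minimum = m[0][0]
--     maximum = m[0][0]
--     for i in  m:
--         for n in i:
--             if n < minimum:
--                 minimum=n
--             if n>maximum:
--                 maximum=n
--     r=(minimum,maximum)
--     return r
-- ===== SOURCE B (Python) =====
-- def matrixMinMax(m):     #list ----> tuple
--     # B: flatten once, then two builtin reductions (idiomatic).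
--     vals = [n for row in m for n in row]
--     return (min(vals), max(vals))
-- ===== Notes on version B (the rewrite author's own statement) =====
-- stated objective: idiomatic
-- what changed: Replaces the fused nested-loop min/max tracking with flattening the matrix once and applying the builtin min and max reductions.
import Mathlib
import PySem

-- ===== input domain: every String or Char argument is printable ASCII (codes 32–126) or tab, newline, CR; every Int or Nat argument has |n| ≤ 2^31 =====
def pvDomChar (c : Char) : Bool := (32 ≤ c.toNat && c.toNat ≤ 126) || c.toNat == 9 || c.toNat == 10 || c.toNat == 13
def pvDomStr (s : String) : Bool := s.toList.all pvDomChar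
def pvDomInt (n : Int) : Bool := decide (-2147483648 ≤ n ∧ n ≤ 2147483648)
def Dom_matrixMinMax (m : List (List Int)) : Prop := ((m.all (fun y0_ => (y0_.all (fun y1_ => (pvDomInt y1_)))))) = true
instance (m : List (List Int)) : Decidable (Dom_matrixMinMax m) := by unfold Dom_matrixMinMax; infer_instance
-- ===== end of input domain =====

-- B replaces A's fused nested-loop min/max tracking by one flatten plus two builtin reductions (idiomatic).

-- ===== PORT A =====
-- seed m[0][0]; outside Pre_ (empty matrix / empty first row) Python raises IndexError, the port's
-- headD defaults are never reached by the claim.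
def matrixMinMax (m : List (List Int)) : Int × Int :=
  let seed := (m.headD []).headD 0
  m.foldl (fun (p : Int × Int) i =>
    i.foldl (fun (q : Int × Int) n =>
      let minimum := if n < q.1 then n else q.1
      let maximum := if n > q.2 then n else q.2
      (minimum, maximum)) p) (seed, seed)

-- ===== PORT B =====
-- vals = [n for row in m for n in row]; (min(vals), max(vals)); getD 0 unreachable under Pre_.
def matrixMinMax_alt (m : List (List Int)) : Int × Int :=
  let vals := m.flatMap (fun row => row)
  ((PySem.List.min? vals (fun x => x)).getD 0, (PySem.List.max? vals (fun x => x)).getD 0)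

-- ===== PRECONDITION & SPEC =====
-- Pre_ admits exactly the inputs where Python A returns: m[0][0] must exist.
def Pre_matrixMinMax (m : List (List Int)) : Prop := m ≠ [] ∧ m.headD [] ≠ []
instance (m : List (List Int)) : Decidable (Pre_matrixMinMax m) := by unfold Pre_matrixMinMax; infer_instance
def pvWitness_matrixMinMax : List (List Int) := [[3, 1], [2]]

def Spec_matrixMinMax (m : List (List Int)) (out : Int × Int) : Prop := out = matrixMinMax_alt m
instance (m : List (List Int)) (out : Int × Int) : Decidable (Spec_matrixMinMax m out) := by unfold Spec_matrixMinMax; infer_instance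

-- ===== CLAIM (what is proved, stated in full; the proofs are below) =====
def Claim_equal_matrixMinMax : Prop := ∀ (m : List (List Int)), Dom_matrixMinMax m → Pre_matrixMinMax m → Spec_matrixMinMax m (matrixMinMax m)

-- ===== LEMMAS AND PROOFS =====

-- one row of A's fused loop splits into a min-fold and a max-fold
theorem row_fold (l : List Int) (a b : Int) :
    l.foldl (fun (q : Int × Int) n =>
      ((if n < q.1 then n else q.1), (if n > q.2 then n else q.2))) (a, b)
    = (l.foldl (fun x n => if n < x then n else x) a,
       l.foldl (fun x n => if n > x then n else x) b) := by
  induction l generalizing a b with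
  | nil => rfl
  | cons h t ih => simp [List.foldl_cons, ih]

-- A's double loop = the same two folds over the flattened list
theorem fused_fold (rows : List (List Int)) (a b : Int) :
    rows.foldl (fun (p : Int × Int) i =>
      i.foldl (fun (q : Int × Int) n =>
        ((if n < q.1 then n else q.1), (if n > q.2 then n else q.2))) p) (a, b)
    = ((rows.flatMap (fun row => row)).foldl (fun x n => if n < x then n else x) a,
       (rows.flatMap (fun row => row)).foldl (fun x n => if n > x then n else x) b) := by
  induction rows generalizing a b with
  | nil => rfl
  | cons h t ih => simp [List.foldl_cons, row_fold, ih]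

theorem min_branch : (fun (x n : Int) => if n < x then n else x) = min := by
  funext x n
  simp [min_def]
  split_ifs <;> omega

theorem max_branch : (fun (x n : Int) => if n > x then n else x) = max := by
  funext x n
  simp [max_def]
  split_ifs <;> omega

-- ===== VERDICT (by name: the statement is the Claim_ definition above) =====
theorem matrixMinMax_spec : Claim_equal_matrixMinMax := by
  intro m _ hpre
  obtain ⟨hne, hrow⟩ := hpre
  obtain ⟨r, t, rfl⟩ : ∃ r t, m = r :: t := by
    cases m with
    | nil => exact absurd rfl hne
    | cons r t => exact ⟨r, t, rfl⟩
  obtain ⟨x, rest, rfl⟩ : ∃ x rest, r = x :: rest := by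
    cases r with
    | nil => exact absurd rfl hrow
    | cons x rest => exact ⟨x, rest, rfl⟩
  show matrixMinMax _ = matrixMinMax_alt _
  unfold matrixMinMax matrixMinMax_alt
  simp only [List.headD_cons, fused_fold, min_branch, max_branch]
  simp [PySem.List.min?_id_cons, PySem.List.max?_id_cons, List.foldl_cons]
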